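-- pv_equiv track=rewrite | github.com/Nghia03092004/nghia03092004.github.io | project_euler_unified/problem_953/solution.py | count_reaching_target
-- ===== SOURCE A (Python) =====
-- def simulate_network(bits, comps):
--     """Run bits through comparators, return list of states after each step."""
--     state = list(bits)
--     states = [tuple(state)]
--     for (i, j) in comps:
--         if state[i] > state[j]:
--             state[i], state[j] = state[j], state[i]
--         states.append(tuple(state))
--     return states
--
-- def count_reaching_target(n, comps, target):
--     """Count balanced inputs that reach target at any intermediate step."""
--     count = 0
--     first_hit_stage = []
--     for inp in range(2 ** n):
--         bits = [(inp >> i) & 1 for i in range(n)]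
--         if sum(bits) != n // 2:
--             continue
--         states = simulate_network(bits, comps)
--         for stage_idx, st in enumerate(states):
--             if st == target:
--                 count += 1
--                 first_hit_stage.append(stage_idx)
--                 break
--     return count, first_hit_stage
-- ===== SOURCE B (Python) =====
-- def _swap(st, i, j):
--     """Comparator applied to an immutable state tuple."""
--     if st[i] > st[j]:
--         lst = list(st)
--         lst[i], lst[j] = lst[j], lst[i]
--         return tuple(lst)
--     return st
--
-- def count_reaching_target(n, comps, target):
--     """Stage-synchronous sweep: all balanced inputs advance through the
--     network in lockstep; an input leaves the frontier at its first hit."""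
--     half = n // 2
--     active = []               # (inp, state) still searching
--     hits = []                 # (inp, stage) first hits, in discovery order
--     for inp in range(2 ** n):
--         state = tuple((inp >> i) & 1 for i in range(n))
--         if sum(state) != half:
--             continue
--         if state == target:
--             hits.append((inp, 0))
--         else:
--             active.append((inp, state))
--     for stage, (i, j) in enumerate(comps, start=1):
--         stepped = [(inp, _swap(st, i, j)) for inp, st in active]
--         hits.extend((inp, stage) for inp, st in stepped if st == target)
--         active = [(inp, st) for inp, st in stepped if st != target]
--     hits.sort(key=lambda h: h[0])
--     return len(hits), [stage for _, stage in hits]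
-- ===== Notes on version B (the rewrite author's own statement) =====
-- stated objective: alternative
-- what changed: B transposes the loops: instead of simulating the whole network per input and scanning that input's trajectory, it advances ALL balanced inputs through the network stage by stage in lockstep, removing each input from the shrinking frontier at its first hit, then sorts the collected (input, stage) hits by input to recover A's increasing-input output order.
import Mathlib
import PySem

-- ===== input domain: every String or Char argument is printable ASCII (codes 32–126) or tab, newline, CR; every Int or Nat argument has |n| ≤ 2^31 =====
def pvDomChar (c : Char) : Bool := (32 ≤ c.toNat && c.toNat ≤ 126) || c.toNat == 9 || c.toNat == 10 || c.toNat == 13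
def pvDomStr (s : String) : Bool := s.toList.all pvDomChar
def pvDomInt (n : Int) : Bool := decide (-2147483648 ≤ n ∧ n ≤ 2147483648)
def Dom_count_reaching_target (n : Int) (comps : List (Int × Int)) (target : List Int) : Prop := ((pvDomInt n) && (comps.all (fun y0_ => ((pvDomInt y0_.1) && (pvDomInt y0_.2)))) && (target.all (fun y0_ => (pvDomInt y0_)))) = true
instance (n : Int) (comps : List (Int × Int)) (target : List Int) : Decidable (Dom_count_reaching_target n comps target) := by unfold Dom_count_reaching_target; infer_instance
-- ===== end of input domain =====

-- B transposes the loops: all balanced inputs advance through the network stage by stage in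
-- lockstep (a shrinking frontier), hits are collected as (input, stage) pairs and sorted by
-- input at the end to recover A's output order (objective: alternative).

-- ===== PORT A =====
-- shared by both Pythons: the comparator step 'if state[i] > state[j]: swap' (pyGetD/pySetD are
-- total stand-ins for state[i]; Pre_ keeps every index in range, where they are exact)
def pvStep (state : List Int) (c : Int × Int) : List Int :=
  let a := PySem.List.pyGetD state c.1 0
  let b := PySem.List.pyGetD state c.2 0
  if b < a then PySem.List.pySetD (PySem.List.pySetD state c.1 b) c.2 a else state

-- shared by both Pythons: bits = [(inp >> i) & 1 for i in range(n)] (inp, i ≥ 0 here)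
def pvBits (n : Int) (inp : Int) : List Int :=
  (PySem.List.pyRange 0 n 1).map (fun i => (((inp.toNat >>> i.toNat) &&& 1 : Nat) : Int))

-- A's simulate_network: the states list [initial, after comp 1, …], built head-first
def pvSimulate (bits : List Int) (comps : List (Int × Int)) : List (List Int) :=
  match comps with
  | [] => [bits]
  | c :: rest => bits :: pvSimulate (pvStep bits c) rest

-- A's 'for stage_idx, st in enumerate(states): if st == target: … break'
def pvFindHit (states : List (List Int)) (target : List Int) (idx : Int) : Option Int :=
  match states with
  | [] => none
  | s :: rest => if s = target then some idx else pvFindHit rest target (idx + 1)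

def count_reaching_target (n : Int) (comps : List (Int × Int)) (target : List Int) : Int × List Int :=
  (PySem.List.pyRange 0 ((2 : Int) ^ n.toNat) 1).foldl
    (fun acc inp =>
      let bits := pvBits n inp
      if bits.sum ≠ PySem.Int.floordiv n 2 then acc
      else
        match pvFindHit (pvSimulate bits comps) target 0 with
        | some idx => (acc.1 + 1, acc.2 ++ [idx])
        | none => acc)
    (0, [])

-- ===== PORT B =====
-- B's comparator loop 'for stage, (i, j) in enumerate(comps, start=1)': step the whole frontier,
-- move the states that became target into hits, keep the rest active
def pvStageLoop (target : List Int) : List (Int × Int) → Int → List (Int × List Int) → List (Int × Int) → List (Int × Int)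
  | [], _, _, hits => hits
  | c :: rest, stage, active, hits =>
      let stepped := active.map (fun p => (p.1, pvStep p.2 c))
      pvStageLoop target rest (stage + 1)
        (stepped.filter (fun p => !decide (p.2 = target)))
        (hits ++ (stepped.filter (fun p => decide (p.2 = target))).map (fun p => (p.1, stage + 1)))

def count_reaching_target_alt (n : Int) (comps : List (Int × Int)) (target : List Int) : Int × List Int :=
  -- first pass: split the balanced inputs into stage-0 hits and the initial frontier
  let init := (PySem.List.pyRange 0 ((2 : Int) ^ n.toNat) 1).foldl
    (fun (acc : List (Int × Int) × List (Int × List Int)) inp =>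
      let state := pvBits n inp
      if state.sum ≠ PySem.Int.floordiv n 2 then acc
      else if state = target then (acc.1 ++ [(inp, 0)], acc.2)
      else (acc.1, acc.2 ++ [(inp, state)]))
    ([], [])
  let hits := pvStageLoop target comps 0 init.2 init.1
  let hitsSorted := PySem.List.sorted hits (fun h => h.1)
  ((hitsSorted.length : Int), hitsSorted.map (fun h => h.2))

-- ===== PRECONDITION & SPEC =====
-- Pre_ = exactly the inputs where Python A returns: n ≥ 0 (range(2**n) needs an int) and every
-- comparator index in Python range of the n-element state (otherwise state[i] raises IndexError).
def Pre_count_reaching_target (n : Int) (comps : List (Int × Int)) (target : List Int) : Prop :=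
  0 ≤ n ∧ ∀ c ∈ comps, PySem.Raise.InRange n.toNat c.1 ∧ PySem.Raise.InRange n.toNat c.2
instance (n : Int) (comps : List (Int × Int)) (target : List Int) : Decidable (Pre_count_reaching_target n comps target) := by unfold Pre_count_reaching_target; infer_instance

def pvWitness_count_reaching_target : Int × (List (Int × Int)) × List Int := (2, [(0, 1)], [0, 1])

def Spec_count_reaching_target (n : Int) (comps : List (Int × Int)) (target : List Int) (out : Int × List Int) : Prop := out = count_reaching_target_alt n comps target
instance (n : Int) (comps : List (Int × Int)) (target : List Int) (out : Int × List Int) : Decidable (Spec_count_reaching_target n comps target out) := by unfold Spec_count_reaching_target; infer_instance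

-- ===== CLAIM (what is proved, stated in full; the proofs are below) =====
def Claim_equal_count_reaching_target : Prop := ∀ (n : Int) (comps : List (Int × Int)) (target : List Int), Dom_count_reaching_target n comps target → Pre_count_reaching_target n comps target → Spec_count_reaching_target n comps target (count_reaching_target n comps target)

-- ===== LEMMAS AND PROOFS =====

-- the per-input first-hit function both characterizations are phrased with (proof-side only)
def pvHitFrom (target : List Int) (comps : List (Int × Int)) (st : List Int) (stage : Int) : Option Int :=
  match comps with
  | [] => none
  | c :: rest =>
    let st' := pvStep st c
    if st' = target then some (stage + 1) else pvHitFrom target rest st' (stage + 1)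

def pvFA (n : Int) (comps : List (Int × Int)) (target : List Int) (inp : Int) : Option Int :=
  if (pvBits n inp).sum = PySem.Int.floordiv n 2 then
    (if pvBits n inp = target then some 0 else pvHitFrom target comps (pvBits n inp) 0)
  else none

def pvGB (n : Int) (comps : List (Int × Int)) (target : List Int) (inp : Int) : Option (Int × Int) :=
  (pvFA n comps target inp).map (fun s => (inp, s))

def pvL (n : Int) (comps : List (Int × Int)) (target : List Int) : List (Int × Int) :=
  (PySem.List.pyRange 0 ((2 : Int) ^ n.toNat) 1).filterMap (pvGB n comps target)

-- the split of the balanced inputs made by B's first pass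
def pvG0 (n : Int) (target : List Int) (inp : Int) : Option (Int × Int) :=
  if (pvBits n inp).sum = PySem.Int.floordiv n 2 ∧ pvBits n inp = target then some (inp, 0) else none

def pvGA (n : Int) (target : List Int) (inp : Int) : Option (Int × List Int) :=
  if (pvBits n inp).sum = PySem.Int.floordiv n 2 ∧ pvBits n inp ≠ target then some (inp, pvBits n inp) else none

-- scanning A's trajectory list for the first match = the per-input first-hit function
theorem pvFindHit_simulate (target : List Int) (comps : List (Int × Int)) (state : List Int) (k : Int) :
    pvFindHit (pvSimulate state comps) target k =
      (if state = target then some k else pvHitFrom target comps state k) := by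
  induction comps generalizing state k with
  | nil => simp [pvSimulate, pvFindHit, pvHitFrom]
  | cons c rest ih =>
      simp only [pvSimulate, pvFindHit, pvHitFrom, ih (pvStep state c) (k + 1)]

-- A's count-and-append fold over a list = length and contents of a filterMap pass
theorem pv_foldl_filterMap (g : Int → Option Int) (xs : List Int) (c : Int) (l : List Int) :
    xs.foldl
        (fun acc inp =>
          match g inp with
          | some idx => (acc.1 + 1, acc.2 ++ [idx])
          | none => acc)
        (c, l)
      = (c + ((xs.filterMap g).length : Int), l ++ xs.filterMap g) := by
  induction xs generalizing c l with
  | nil => simp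
  | cons x xs ih =>
      cases hx : g x with
      | none => simp [List.foldl_cons, hx, ih]
      | some idx =>
          simp only [List.foldl_cons, List.filterMap_cons, hx, ih]
          simp
          omega

-- B's first pass = the two filterMaps pvG0 / pvGA
theorem pv_initfold (n : Int) (target : List Int) (xs : List Int)
    (accH : List (Int × Int)) (accA : List (Int × List Int)) :
    xs.foldl
        (fun (acc : List (Int × Int) × List (Int × List Int)) inp =>
          let state := pvBits n inp
          if state.sum ≠ PySem.Int.floordiv n 2 then acc
          else if state = target then (acc.1 ++ [(inp, 0)], acc.2)
          else (acc.1, acc.2 ++ [(inp, state)]))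
        (accH, accA)
      = (accH ++ xs.filterMap (pvG0 n target), accA ++ xs.filterMap (pvGA n target)) := by
  induction xs generalizing accH accA with
  | nil => simp
  | cons x xs ih =>
      simp only [List.foldl_cons, List.filterMap_cons]
      by_cases hs : (pvBits n x).sum = PySem.Int.floordiv n 2
      · by_cases ht : pvBits n x = target
        · rw [if_neg (not_not_intro hs), if_pos ht, ih]
          unfold pvG0 pvGA
          rw [if_pos ⟨hs, ht⟩, if_neg (fun h => h.2 ht)]
          simp
        · rw [if_neg (not_not_intro hs), if_neg ht, ih]
          unfold pvG0 pvGA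
          rw [if_neg (fun h => ht h.2), if_pos ⟨hs, ht⟩]
          simp
      · rw [if_pos hs, ih]
        unfold pvG0 pvGA
        rw [if_neg (fun h => hs h.1), if_neg (fun h => hs h.1)]

-- one pass split into its hit part and its miss part is a permutation of the combined pass
theorem pv_split_perm {α β : Type} (p : α → Bool) (f : α → β) (g : α → Option β) (l : List α) :
    ((l.filter p).map f ++ (l.filter (fun x => !p x)).filterMap g).Perm
      (l.filterMap (fun x => if p x then some (f x) else g x)) := by
  induction l with
  | nil => simp
  | cons x xs ih =>
      cases hp : p x with
      | true => simpa [List.filter_cons, hp, List.filterMap_cons] using ih.cons (f x)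
      | false =>
          cases hg : g x with
          | none => simpa [List.filter_cons, hp, List.filterMap_cons, hg] using ih
          | some y =>
              simp only [List.filter_cons, hp, Bool.not_false, List.filterMap_cons, hg,
                Bool.false_eq_true, if_false, if_true]
              exact List.perm_middle.trans (ih.cons y)

-- two passes with disjoint support are a permutation of one combined pass
theorem pv_or_perm {α β : Type} (g1 g2 : α → Option β) (l : List α)
    (h : ∀ x ∈ l, g1 x = none ∨ g2 x = none) :
    (l.filterMap g1 ++ l.filterMap g2).Perm (l.filterMap (fun x => (g1 x).or (g2 x))) := by
  induction l with
  | nil => simp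
  | cons x xs ih =>
      have hx := h x (by simp)
      have ih' := ih (fun y hy => h y (by simp [hy]))
      cases hg1 : g1 x with
      | some y =>
          have hg2 : g2 x = none := by
            rcases hx with h1 | h2
            · rw [hg1] at h1; cases h1
            · exact h2
          simpa [List.filterMap_cons, hg1, hg2, Option.or] using ih'.cons y
      | none =>
          cases hg2 : g2 x with
          | none => simpa [List.filterMap_cons, hg1, hg2, Option.or] using ih'
          | some y =>
              simp only [List.filterMap_cons, hg1, hg2, Option.or]
              exact List.perm_middle.trans (ih'.cons y)

-- B's stage loop = hits so far plus each frontier member's own first hit (as a multiset)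
theorem pv_stageLoop_perm (target : List Int) (comps : List (Int × Int)) :
    ∀ (stage : Int) (active : List (Int × List Int)) (hits : List (Int × Int)),
      (pvStageLoop target comps stage active hits).Perm
        (hits ++ active.filterMap (fun p => (pvHitFrom target comps p.2 stage).map (fun s => (p.1, s)))) := by
  induction comps with
  | nil => intro stage active hits; simp [pvStageLoop, pvHitFrom]
  | cons c rest ih =>
      intro stage active hits
      simp only [pvStageLoop]
      refine (ih (stage + 1) _ _).trans ?_
      rw [List.append_assoc]
      refine List.Perm.append_left hits ?_
      refine ((pv_split_perm (fun p => decide (p.2 = target)) (fun p => (p.1, stage + 1))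
        (fun p => (pvHitFrom target rest p.2 (stage + 1)).map (fun s => (p.1, s)))
        (active.map (fun p => (p.1, pvStep p.2 c)))).trans ?_)
      rw [List.filterMap_map]
      apply List.Perm.of_eq
      apply List.filterMap_congr
      intro p _
      by_cases hp : pvStep p.2 c = target
      · simp [Function.comp, hp, pvHitFrom]
      · simp [Function.comp, hp, pvHitFrom]

-- the values B's first pass feeds the stage loop combine into exactly the per-input pass pvGB
theorem pv_combined_eq (n : Int) (comps : List (Int × Int)) (target : List Int) (inp : Int) :
    ((pvG0 n target inp).or ((pvGA n target inp).bind
        (fun p => (pvHitFrom target comps p.2 0).map (fun s => (p.1, s)))))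
      = pvGB n comps target inp := by
  unfold pvG0 pvGA pvGB pvFA
  by_cases hs : (pvBits n inp).sum = PySem.Int.floordiv n 2
  · by_cases ht : pvBits n inp = target
    · rw [if_pos ⟨hs, ht⟩, if_neg (fun h => h.2 ht), if_pos hs, if_pos ht]
      simp [Option.or]
    · rw [if_neg (fun h => ht h.2), if_pos ⟨hs, ht⟩, if_pos hs, if_neg ht]
      simp [Option.or]
  · rw [if_neg (fun h => hs h.1), if_neg (fun h => hs h.1), if_neg hs]
    simp [Option.or]

-- pyRange with step 1 is strictly increasing
theorem pv_pyRange_pairwise (a b : Int) : (PySem.List.pyRange a b).Pairwise (· < ·) := by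
  by_cases hab : a < b
  · rw [PySem.List.pyRange_one_cons hab]
    refine List.Pairwise.cons ?_ (pv_pyRange_pairwise (a + 1) b)
    intro x hx
    have := PySem.List.mem_pyRange_one.mp hx
    omega
  · rw [PySem.List.pyRange_one_eq_nil (by omega)]
    exact List.Pairwise.nil
termination_by (b - a).toNat
decreasing_by omega

-- so the combined pass pvL is strictly increasing in its first components
theorem pv_pvL_pairwise (n : Int) (comps : List (Int × Int)) (target : List Int) :
    (pvL n comps target).Pairwise (fun a b => a.1 < b.1) := by
  unfold pvL
  rw [List.pairwise_filterMap]
  refine (pv_pyRange_pairwise 0 ((2 : Int) ^ n.toNat)).imp_of_mem ?_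
  intro a b _ _ hab x hx y hy
  have hxa : x.1 = a := by
    unfold pvGB at hx; cases h : pvFA n comps target a <;> simp [h] at hx <;> simp [← hx]
  have hyb : y.1 = b := by
    unfold pvGB at hy; cases h : pvFA n comps target b <;> simp [h] at hy <;> simp [← hy]
  rw [hxa, hyb]; exact hab

-- A computes the lengths-and-stages of the combined pass directly
theorem pv_A_eq (n : Int) (comps : List (Int × Int)) (target : List Int) :
    count_reaching_target n comps target
      = ((((PySem.List.pyRange 0 ((2 : Int) ^ n.toNat) 1).filterMap (pvFA n comps target)).length : Int),
         (PySem.List.pyRange 0 ((2 : Int) ^ n.toNat) 1).filterMap (pvFA n comps target)) := by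
  unfold count_reaching_target
  have hfun :
      (fun (acc : Int × List Int) inp =>
        let bits := pvBits n inp
        if bits.sum ≠ PySem.Int.floordiv n 2 then acc
        else
          match pvFindHit (pvSimulate bits comps) target 0 with
          | some idx => (acc.1 + 1, acc.2 ++ [idx])
          | none => acc)
      = (fun (acc : Int × List Int) inp =>
          match pvFA n comps target inp with
          | some idx => (acc.1 + 1, acc.2 ++ [idx])
          | none => acc) := by
    funext acc inp
    dsimp only
    unfold pvFA
    by_cases h : (pvBits n inp).sum = PySem.Int.floordiv n 2
    · rw [if_neg (not_not_intro h), if_pos h, pvFindHit_simulate]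
    · rw [if_pos h, if_neg h]
  rw [hfun, pv_foldl_filterMap]
  simp

-- B's raw hit list is a permutation of the combined pass
theorem pv_B_perm (n : Int) (comps : List (Int × Int)) (target : List Int) :
    (pvStageLoop target comps 0
        ((PySem.List.pyRange 0 ((2 : Int) ^ n.toNat) 1).filterMap (pvGA n target))
        ((PySem.List.pyRange 0 ((2 : Int) ^ n.toNat) 1).filterMap (pvG0 n target))).Perm
      (pvL n comps target) := by
  refine (pv_stageLoop_perm target comps 0 _ _).trans ?_
  rw [List.filterMap_filterMap]
  refine (pv_or_perm (pvG0 n target) _ _ ?_).trans ?_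
  · intro x _
    by_cases hs : (pvBits n x).sum = PySem.Int.floordiv n 2
    · by_cases ht : pvBits n x = target
      · right; unfold pvGA; rw [if_neg (fun h => h.2 ht)]; rfl
      · left; unfold pvG0; rw [if_neg (fun h => ht h.2)]
    · left; unfold pvG0; rw [if_neg (fun h => hs h.1)]
  · apply List.Perm.of_eq
    unfold pvL
    apply List.filterMap_congr
    intro inp _
    exact pv_combined_eq n comps target inp

-- B = lengths-and-stages of the combined pass, too
theorem pv_B_eq (n : Int) (comps : List (Int × Int)) (target : List Int) :
    count_reaching_target_alt n comps target
      = (((pvL n comps target).length : Int), (pvL n comps target).map (fun h => h.2)) := by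
  unfold count_reaching_target_alt
  rw [pv_initfold]
  simp only [List.nil_append]
  rw [PySem.List.sorted_eq_of_perm_of_pairwise_lt _ _ _ (pv_B_perm n comps target).symm
    (pv_pvL_pairwise n comps target)]

-- ===== VERDICT (by name: the statement is the Claim_ definition above) =====
theorem count_reaching_target_spec : Claim_equal_count_reaching_target := by
  intro n comps target _ _
  show _ = _
  rw [pv_A_eq, pv_B_eq]
  have hmap : (pvL n comps target).map (fun h => h.2)
      = (PySem.List.pyRange 0 ((2 : Int) ^ n.toNat) 1).filterMap (pvFA n comps target) := by
    unfold pvL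
    rw [List.map_filterMap]
    apply List.filterMap_congr
    intro inp _
    unfold pvGB
    cases h : pvFA n comps target inp <;> simp [h]
  refine Prod.ext ?_ (by rw [hmap])
  simp only
  rw [← hmap, List.length_map]
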